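-- pv_equiv track=rewrite | github.com/MrBrantCode/unitest_baseline | mut_generate/mist_train_taco/taco_7176/solution.py | min_operations_to_uniform_string
-- ===== SOURCE A (Python) =====
-- def min_operations_to_uniform_string(s: str) -> int:
--     l = len(s)
--     d, a = {}, {}
--
--     for i, c in enumerate(s):
--         if c in d:
--             d[c] = max(d[c], i - a[c])
--         else:
--             d[c] = i
--         a[c] = i + 1
--
--     for c, v in d.items():
--         d[c] = max(v, l - a[c])
--
--     return min(d.values())
-- ===== SOURCE B (Python) =====
-- def min_operations_to_uniform_string(s: str) -> int:
--     l = len(s)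
--     positions = {}
--     for i, c in enumerate(s):
--         positions.setdefault(c, []).append(i)
--     gaps = []
--     for ps in positions.values():
--         g = ps[0]
--         for prev, cur in zip(ps, ps[1:]):
--             g = max(g, cur - prev - 1)
--         gaps.append(max(g, l - 1 - ps[-1]))
--     return min(gaps)
-- ===== Notes on version B (the rewrite author's own statement) =====
-- stated objective: simpler
-- what changed: Replaces A's incremental two-dict gap/last-seen bookkeeping plus a second fix-up pass over the dict with a single occurrence-index dict (setdefault/append) followed by a direct per-character max-gap computation from the index list.
import Mathlib
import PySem

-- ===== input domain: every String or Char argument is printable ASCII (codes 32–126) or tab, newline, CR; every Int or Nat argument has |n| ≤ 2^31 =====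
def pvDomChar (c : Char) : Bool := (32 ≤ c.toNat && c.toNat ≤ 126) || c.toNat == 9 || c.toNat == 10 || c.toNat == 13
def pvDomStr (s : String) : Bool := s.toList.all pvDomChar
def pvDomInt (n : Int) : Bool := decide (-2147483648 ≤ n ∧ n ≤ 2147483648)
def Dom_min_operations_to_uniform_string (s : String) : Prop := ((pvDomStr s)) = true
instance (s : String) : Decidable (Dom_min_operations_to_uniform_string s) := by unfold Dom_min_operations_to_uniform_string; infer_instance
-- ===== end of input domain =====

-- B replaces A's incremental gap/last-seen bookkeeping with an occurrence-index dict and a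
-- direct per-character max-gap computation (objective: simpler; same O(n) cost).


-- ===== PORT A =====
-- one iteration of A's first loop over (i, c): update d (max gap so far) and a (last index + 1)
def aStep (st : PySem.Dict Char Int × PySem.Dict Char Int) (p : Int × Char) :
    PySem.Dict Char Int × PySem.Dict Char Int :=
  let d := if st.1.contains p.2 then
             st.1.insert p.2 (max (st.1.getD p.2 0) (p.1 - st.2.getD p.2 0))
           else st.1.insert p.2 p.1
  (d, st.2.insert p.2 (p.1 + 1))

def min_operations_to_uniform_string (s : String) : Int :=
  let l : Int := PySem.Str.len s
  let st := (PySem.List.enumerate s.toList).foldl aStep (PySem.Dict.empty, PySem.Dict.empty)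
  -- second loop: d[c] = max(v, l - a[c]) for each (c, v) in d.items()
  let d := st.1.items.foldl (fun d2 p => d2.insert p.1 (max p.2 (l - st.2.getD p.1 0))) st.1
  match PySem.List.min? d.values (fun x => x) with
  | some m => m
  | none => 0   -- unreachable under Pre_ (Python's min raises ValueError on the empty string)

-- ===== PORT B =====
-- running max over consecutive-pair gaps, seeded with ps[0]
def bInner (ps : List Int) : Int :=
  (ps.zip ps.tail).foldl (fun g pr => max g (pr.2 - pr.1 - 1)) (ps.headD 0)

-- max gap for one character from its (nonempty) occurrence-index list
def bGap (l : Int) (ps : List Int) : Int :=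
  max (bInner ps) (l - 1 - (ps.getLast?.getD 0))

def min_operations_to_uniform_string_alt (s : String) : Int :=
  let l : Int := PySem.Str.len s
  let pos := (PySem.List.enumerate s.toList).foldl
    (fun d p => d.modify p.2 [] (fun ps => ps ++ [p.1])) PySem.Dict.empty
  let gaps := pos.values.map (bGap l)
  match PySem.List.min? gaps (fun x => x) with
  | some m => m
  | none => 0   -- unreachable under Pre_

-- ===== PRECONDITION & SPEC =====
-- Pre_ excludes only the empty string, on which A's min(d.values()) raises ValueError (B raises too).
def Pre_min_operations_to_uniform_string (s : String) : Prop := s ≠ ""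
instance (s : String) : Decidable (Pre_min_operations_to_uniform_string s) := by
  unfold Pre_min_operations_to_uniform_string; infer_instance
def pvWitness_min_operations_to_uniform_string : String := "aba"

def Spec_min_operations_to_uniform_string (s : String) (out : Int) : Prop := out = min_operations_to_uniform_string_alt s
instance (s : String) (out : Int) : Decidable (Spec_min_operations_to_uniform_string s out) := by unfold Spec_min_operations_to_uniform_string; infer_instance

-- ===== CLAIM (what is proved, stated in full; the proofs are below) =====
def Claim_equal_min_operations_to_uniform_string : Prop := ∀ (s : String), Dom_min_operations_to_uniform_string s → Pre_min_operations_to_uniform_string s → Spec_min_operations_to_uniform_string s (min_operations_to_uniform_string s)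

-- ===== LEMMAS AND PROOFS =====

-- invariant tying A's pair state (d, a) to B's occurrence dict after the same prefix
def pvInv (dA aA : PySem.Dict Char Int) (pos : PySem.Dict Char (List Int)) : Prop :=
  dA.keys = pos.keys ∧ aA.keys = pos.keys ∧ pos.keys.Nodup ∧
  ∀ c : Char, pos.contains c = true →
    pos.getD c [] ≠ [] ∧
    dA.getD c 0 = bInner (pos.getD c []) ∧
    aA.getD c 0 = (pos.getD c []).getLast?.getD 0 + 1

lemma inv_empty : pvInv PySem.Dict.empty PySem.Dict.empty PySem.Dict.empty := by
  refine ⟨rfl, rfl, by simp [pysem], ?_⟩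
  intro c hc
  simp [pysem] at hc

lemma zip_tail_snoc (ps : List Int) (i : Int) (h : ps ≠ []) :
    (ps ++ [i]).zip ((ps ++ [i]).tail) = ps.zip ps.tail ++ [((ps.getLast?).getD 0, i)] := by
  induction ps with
  | nil => exact absurd rfl h
  | cons x t ih =>
    cases t with
    | nil => simp
    | cons y u =>
      have := ih (by simp)
      simpa [List.zip] using this

lemma bInner_snoc (ps : List Int) (i : Int) (h : ps ≠ []) :
    bInner (ps ++ [i]) = max (bInner ps) (i - (ps.getLast?.getD 0) - 1) := by
  unfold bInner
  rw [zip_tail_snoc ps i h, List.foldl_append]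
  cases ps with
  | nil => exact absurd rfl h
  | cons x t => simp

lemma contains_eq_of_keys_eq {ν ν' : Type} (d : PySem.Dict Char ν) (d' : PySem.Dict Char ν')
    (h : d.keys = d'.keys) (c : Char) : d.contains c = d'.contains c := by
  cases hc : d'.contains c with
  | true =>
    exact (PySem.Dict.contains_iff_mem_keys d c).2
      (h ▸ (PySem.Dict.contains_iff_mem_keys d' c).1 hc)
  | false =>
    cases hd : d.contains c with
    | false => rfl
    | true =>
      have := (PySem.Dict.contains_iff_mem_keys d' c).2
        (h ▸ (PySem.Dict.contains_iff_mem_keys d c).1 hd)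
      rw [hc] at this; exact Bool.noConfusion this

lemma inv_step (dA aA : PySem.Dict Char Int) (pos : PySem.Dict Char (List Int))
    (p : Int × Char) (h : pvInv dA aA pos) :
    pvInv (aStep (dA, aA) p).1 (aStep (dA, aA) p).2
        (pos.modify p.2 [] (fun ps => ps ++ [p.1])) := by
  obtain ⟨i, c⟩ := p
  obtain ⟨hk1, hk2, hnd, hpt⟩ := h
  have hdc : dA.contains c = pos.contains c := contains_eq_of_keys_eq _ _ hk1 c
  have hac : aA.contains c = pos.contains c := contains_eq_of_keys_eq _ _ hk2 c
  cases hb : pos.contains c with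
  | true =>
    obtain ⟨hne, hd, ha⟩ := hpt c hb
    have hkm : (pos.modify c [] (fun ps => ps ++ [i])).keys = pos.keys := by
      rw [PySem.Dict.keys_modify]
      exact PySem.Dict.keys_insert_of_contains _ _ hb
    refine ⟨?_, ?_, by rw [hkm]; exact hnd, ?_⟩
    · simp only [aStep, hdc, hb, if_true]
      rw [PySem.Dict.keys_insert_of_contains _ _ (hdc.trans hb), hk1, hkm]
    · simp only [aStep]
      rw [PySem.Dict.keys_insert_of_contains _ _ (hac.trans hb), hk2, hkm]
    · intro c' hc'
      rw [PySem.Dict.contains_modify] at hc'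
      by_cases hcc : c' = c
      · subst hcc
        have hgm : (pos.modify c' [] (fun ps => ps ++ [i])).getD c' [] = pos.getD c' [] ++ [i] :=
          PySem.Dict.getD_modify_self _ _ _ _
        refine ⟨by simp [hgm], ?_, ?_⟩
        · simp only [aStep, hdc, hb, if_true]
          rw [hgm, PySem.Dict.getD_insert_self, bInner_snoc _ _ hne, hd, ha]
          omega
        · simp only [aStep]
          rw [hgm, PySem.Dict.getD_insert_self, List.getLast?_concat]
          rfl
      · have hb' : pos.contains c' = true := by
          simpa [hcc] using hc'
        obtain ⟨hne', hd', ha'⟩ := hpt c' hb'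
        have hgm : (pos.modify c [] (fun ps => ps ++ [i])).getD c' [] = pos.getD c' [] :=
          PySem.Dict.getD_modify_of_ne _ _ _ hcc
        refine ⟨by rw [hgm]; exact hne', ?_, ?_⟩
        · simp only [aStep, hdc, hb, if_true]
          rw [hgm, PySem.Dict.getD_insert_of_ne _ _ _ hcc]
          exact hd'
        · simp only [aStep]
          rw [hgm, PySem.Dict.getD_insert_of_ne _ _ _ hcc]
          exact ha'
  | false =>
    have hnm : c ∉ pos.keys := fun hm =>
      by rw [(PySem.Dict.contains_iff_mem_keys pos c).2 hm] at hb; exact Bool.noConfusion hb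
    have hg0 : pos.getD c [] = [] := PySem.Dict.getD_of_not_contains _ _ hb
    have hkm : (pos.modify c [] (fun ps => ps ++ [i])).keys = pos.keys ++ [c] := by
      rw [PySem.Dict.keys_modify]
      exact PySem.Dict.keys_insert_of_not_contains _ _ hb
    refine ⟨?_, ?_, ?_, ?_⟩
    · simp only [aStep, hdc, hb, Bool.false_eq_true, if_false]
      rw [PySem.Dict.keys_insert_of_not_contains _ _ (hdc.trans hb), hk1, hkm]
    · simp only [aStep]
      rw [PySem.Dict.keys_insert_of_not_contains _ _ (hac.trans hb), hk2, hkm]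
    · rw [hkm]
      simp only [List.nodup_append, List.nodup_singleton, true_and]
      exact ⟨hnd, by simp; intro a ha hac'; exact hnm (hac' ▸ ha)⟩
    · intro c' hc'
      by_cases hcc : c' = c
      · subst hcc
        have hgm : (pos.modify c' [] (fun ps => ps ++ [i])).getD c' [] = [i] := by
          simp [PySem.Dict.getD_modify_self, hg0]
        refine ⟨by simp [hgm], ?_, ?_⟩
        · simp only [aStep, hdc, hb, Bool.false_eq_true, if_false]
          rw [hgm, PySem.Dict.getD_insert_self]
          simp [bInner]
        · simp only [aStep]
          rw [hgm, PySem.Dict.getD_insert_self]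
          rfl
      · rw [PySem.Dict.contains_modify] at hc'
        have hb' : pos.contains c' = true := by simpa [hcc] using hc'
        obtain ⟨hne', hd', ha'⟩ := hpt c' hb'
        have hgm : (pos.modify c [] (fun ps => ps ++ [i])).getD c' [] = pos.getD c' [] :=
          PySem.Dict.getD_modify_of_ne _ _ _ hcc
        refine ⟨by rw [hgm]; exact hne', ?_, ?_⟩
        · simp only [aStep, hdc, hb, Bool.false_eq_true, if_false]
          rw [hgm, PySem.Dict.getD_insert_of_ne _ _ _ hcc]
          exact hd'
        · simp only [aStep]
          rw [hgm, PySem.Dict.getD_insert_of_ne _ _ _ hcc]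
          exact ha'

lemma inv_fold (ts : List (Int × Char)) :
    ∀ (dA aA : PySem.Dict Char Int) (pos : PySem.Dict Char (List Int)), pvInv dA aA pos →
    pvInv (ts.foldl aStep (dA, aA)).1 (ts.foldl aStep (dA, aA)).2
        (ts.foldl (fun d p => d.modify p.2 [] (fun ps => ps ++ [p.1])) pos) := by
  induction ts with
  | nil => intro dA aA pos h; exact h
  | cons t ts ih =>
    intro dA aA pos h
    simpa using ih (aStep (dA, aA) t).1 (aStep (dA, aA) t).2 _ (inv_step dA aA pos t h)

-- a fold of inserts at keys not equal to c leaves getD at c unchanged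
lemma getD_foldl_insert_of_not_mem (f : Char × Int → Int) :
    ∀ (ps : List (Char × Int)) (d2 : PySem.Dict Char Int) (c : Char),
    c ∉ ps.map (·.1) →
    (ps.foldl (fun d2 p => d2.insert p.1 (f p)) d2).getD c 0 = d2.getD c 0 := by
  intro ps
  induction ps with
  | nil => intro d2 c _; rfl
  | cons p ps ih =>
    intro d2 c hc
    rw [List.map_cons, List.mem_cons] at hc
    push Not at hc
    rw [List.foldl_cons, ih _ _ hc.2, PySem.Dict.getD_insert_of_ne _ _ _ hc.1]

lemma keys_foldl_insert_val (f : Char × Int → Int) :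
    ∀ (ps : List (Char × Int)) (d2 : PySem.Dict Char Int),
    (∀ q ∈ ps, q.1 ∈ d2.keys) →
    (ps.foldl (fun d2 p => d2.insert p.1 (f p)) d2).keys = d2.keys := by
  intro ps
  induction ps with
  | nil => intro d2 _; rfl
  | cons p ps ih =>
    intro d2 hd
    rw [List.foldl_cons, ih]
    · exact PySem.Dict.keys_insert_of_contains _ _
        ((PySem.Dict.contains_iff_mem_keys _ _).2 (hd p (by simp)))
    · intro q hq
      rw [PySem.Dict.mem_keys_insert]
      exact Or.inr (hd q (by simp [hq]))

-- getD after a fold of inserts over a list of pairs with distinct keys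
lemma getD_foldl_insert_pairs (f : Char × Int → Int) :
    ∀ (ps : List (Char × Int)) (d2 : PySem.Dict Char Int) (c : Char) (v : Int),
    (ps.map (·.1)).Nodup → (c, v) ∈ ps →
    (ps.foldl (fun d2 p => d2.insert p.1 (f p)) d2).getD c 0 = f (c, v) := by
  intro ps
  induction ps with
  | nil => intro d2 c v _ hm; exact absurd hm (List.not_mem_nil)
  | cons p ps ih =>
    intro d2 c v hnd hm
    rw [List.map_cons, List.nodup_cons] at hnd
    rw [List.mem_cons] at hm
    rcases hm with hm | hm
    · subst hm
      rw [List.foldl_cons, getD_foldl_insert_of_not_mem f ps _ c hnd.1,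
        PySem.Dict.getD_insert_self]
    · rw [List.foldl_cons]; exact ih _ _ _ hnd.2 hm

-- values of the dict produced by A's second (fix-up) loop
lemma values_final (dA aA : PySem.Dict Char Int) (l : Int) (hnd : dA.keys.Nodup) :
    (dA.items.foldl (fun d2 p => d2.insert p.1 (max p.2 (l - aA.getD p.1 0))) dA).values
      = dA.keys.map (fun c => max (dA.getD c 0) (l - aA.getD c 0)) := by
  have hkeys : (dA.items.foldl
      (fun d2 p => d2.insert p.1 (max p.2 (l - aA.getD p.1 0))) dA).keys = dA.keys :=
    keys_foldl_insert_val _ _ _ (fun q hq => PySem.Dict.mem_keys_of_mem_items _ hq)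
  rw [PySem.Dict.values_eq_map_keys _ (hkeys ▸ hnd) 0, hkeys]
  apply List.map_congr_left
  intro c hc
  have hcont : dA.contains c = true := (PySem.Dict.contains_iff_mem_keys _ _).2 hc
  obtain ⟨w, hw⟩ : ∃ w, dA.get? c = some w := by
    have := PySem.Dict.contains_eq_isSome_get? dA c
    rw [hcont] at this
    exact Option.isSome_iff_exists.1 this.symm
  have hitems : dA.items = dA.keys.map (fun k => (k, dA.getD k 0)) :=
    PySem.Dict.items_eq_map_keys dA hnd 0
  have hgd : dA.getD c 0 = w := PySem.Dict.getD_of_get?_eq_some _ _ hw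
  have hmem : (c, w) ∈ dA.items := PySem.Dict.mem_items_of_get?_eq_some _ hw
  have hndk : (dA.items.map (·.1)).Nodup := by
    have : dA.items.map (·.1) = dA.keys := rfl
    rw [this]; exact hnd
  rw [getD_foldl_insert_pairs _ _ _ _ _ hndk hmem, hgd]

-- ===== VERDICT (by name: the statement is the Claim_ definition above) =====
theorem min_operations_to_uniform_string_spec : Claim_equal_min_operations_to_uniform_string := by
  intro s _ _
  unfold Spec_min_operations_to_uniform_string
  unfold min_operations_to_uniform_string min_operations_to_uniform_string_alt
  obtain ⟨hk1, hk2, hnd, hpt⟩ := inv_fold (PySem.List.enumerate s.toList)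
    PySem.Dict.empty PySem.Dict.empty PySem.Dict.empty inv_empty
  set st := (PySem.List.enumerate s.toList).foldl aStep (PySem.Dict.empty, PySem.Dict.empty) with hst
  set pos := (PySem.List.enumerate s.toList).foldl
    (fun d p => d.modify p.2 [] (fun ps => ps ++ [p.1])) PySem.Dict.empty with hpos
  have hvA := values_final st.1 st.2 (PySem.Str.len s) (hk1 ▸ hnd)
  have hvB : pos.values.map (bGap (PySem.Str.len s))
      = pos.keys.map (fun c => bGap (PySem.Str.len s) (pos.getD c [])) := by
    rw [PySem.Dict.values_eq_map_keys pos hnd [], List.map_map]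
    rfl
  have hlists : (st.1.items.foldl
        (fun d2 p => d2.insert p.1 (max p.2 (PySem.Str.len s - st.2.getD p.1 0))) st.1).values
      = pos.values.map (bGap (PySem.Str.len s)) := by
    rw [hvA, hvB, hk1]
    apply List.map_congr_left
    intro c hc
    obtain ⟨hne, hd, ha⟩ := hpt c ((PySem.Dict.contains_iff_mem_keys _ _).2 hc)
    rw [hd, ha]
    unfold bGap
    omega
  simp only [hlists]
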